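-- pv_equiv track=rewrite | github.com/CMU15-112/lecture_demos_qatar | week6/lec3-letterCounter.py | letterCounter
-- ===== SOURCE A (Python) =====
-- def letterCounter(s):
--     s = s.lower()
--
--     res = dict()
--
--     for c in s:
--         if c.isalpha():
--             if c not in res:
--                 res[c] = 0
--             res[c] = res[c] + 1
--
--     return res
-- ===== SOURCE B (Python) =====
-- def letterCounter(s):
--     letters = [c for c in s.lower() if c.isalpha()]
--     return {c: letters.count(c) for c in dict.fromkeys(letters)}
-- ===== Notes on version B (the rewrite author's own statement) =====
-- stated objective: alternative
-- what changed: B replaces A's one-pass dict-increment loop with a filter of the lowercased letters, an ordered dedup of them, and a count() per distinct letter.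
import Mathlib
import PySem

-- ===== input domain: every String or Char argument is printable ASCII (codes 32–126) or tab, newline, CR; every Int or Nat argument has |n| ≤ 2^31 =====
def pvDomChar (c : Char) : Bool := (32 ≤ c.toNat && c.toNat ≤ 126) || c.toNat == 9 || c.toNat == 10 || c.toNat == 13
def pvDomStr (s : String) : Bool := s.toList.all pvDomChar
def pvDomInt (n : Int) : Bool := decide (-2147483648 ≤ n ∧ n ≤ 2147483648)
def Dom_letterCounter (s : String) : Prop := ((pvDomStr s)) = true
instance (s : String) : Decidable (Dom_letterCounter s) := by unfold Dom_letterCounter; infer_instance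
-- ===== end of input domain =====

-- B counts letters by dedup-then-count over the filtered lowercase letters instead of A's incremental dict loop; alternative decomposition, same results.


-- ===== PORT A =====
def letterCounter (s : String) : List (String × Int) :=
  let lowered := PySem.Chars.lower s.toList
  (lowered.foldl (fun res c =>
    if PySem.Chars.isalpha c then
      let key := String.singleton c
      let res := if !res.contains key then res.insert key (0 : Int) else res
      res.insert key (res.getD key 0 + 1)
    else res) PySem.Dict.empty).items

-- ===== PORT B =====
def letterCounter_alt (s : String) : List (String × Int) :=
  let letters := ((PySem.Chars.lower s.toList).filter PySem.Chars.isalpha).map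
    (fun c => String.singleton c)
  (PySem.List.dedup letters).map (fun c => (c, (letters.count c : Int)))

-- ===== PRECONDITION & SPEC =====
def Spec_letterCounter (s : String) (out : List (String × Int)) : Prop := out = letterCounter_alt s
instance (s : String) (out : List (String × Int)) : Decidable (Spec_letterCounter s out) := by unfold Spec_letterCounter; infer_instance

-- ===== CLAIM (what is proved, stated in full; the proofs are below) =====
def Claim_equal_letterCounter : Prop := ∀ (s : String), Dom_letterCounter s → Spec_letterCounter s (letterCounter s)

-- ===== LEMMAS AND PROOFS =====

-- A's body for one letter (ensure key present, then increment) is one counting insert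
theorem letterCounter_step (d : PySem.Dict String Int) (k : String) :
    (if !d.contains k then d.insert k (0 : Int) else d).insert k
      ((if !d.contains k then d.insert k (0 : Int) else d).getD k 0 + 1)
      = d.insert k (d.getD k 0 + 1) := by
  by_cases h : d.contains k = true
  · simp [h]
  · simp only [Bool.not_eq_true] at h
    simp [h, PySem.Dict.getD_insert_self, PySem.Dict.insert_insert_self,
      PySem.Dict.getD_of_not_contains (d := d) (k := k) (h := h)]

-- ===== VERDICT (by name: the statement is the Claim_ definition above) =====
theorem letterCounter_spec : Claim_equal_letterCounter := by
  intro s _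
  unfold Spec_letterCounter letterCounter letterCounter_alt
  dsimp only
  rw [PySem.List.foldl_if_eq_foldl_filter]
  rw [show (fun (res : PySem.Dict String Int) (c : Char) =>
        (if !res.contains (String.singleton c) then res.insert (String.singleton c) (0 : Int) else res).insert
          (String.singleton c)
          ((if !res.contains (String.singleton c) then res.insert (String.singleton c) (0 : Int) else res).getD
            (String.singleton c) 0 + 1))
      = fun res c => res.insert (String.singleton c) (res.getD (String.singleton c) 0 + 1) from
    funext fun d => funext fun c => letterCounter_step d (String.singleton c)]
  rw [← List.foldl_map (f := fun c => String.singleton c)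
      (g := fun (d : PySem.Dict String Int) (x : String) => d.insert x (d.getD x 0 + 1))]
  rw [PySem.Dict.foldl_insert_getD_add_one_eq_counter]
  rw [PySem.Dict.items_counter]
  simp [PySem.List.dedup_eq_ofList]
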